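-- pv_equiv track=rewrite | github.com/wilmurillo-ai/Design-Assistant | .skills/openclaw-skills/skills/lukevr/meshtastic-skill/scripts/mesh_digest.py | dedupe_messages
-- ===== SOURCE A (Python) =====
-- def dedupe_messages(messages):
--     """Remove duplicate messages (same text from multiple relays)"""
--     seen = {}
--     unique = []
--
--     for msg in messages:
--         # Normalize text for comparison
--         text_norm = msg["text"].lower().strip()[:50]
--
--         if text_norm in seen:
--             # Keep the one with known distance
--             if msg["distance"] != "?" and seen[text_norm]["distance"] == "?":
--                 seen[text_norm] = msg
--         else:
--             seen[text_norm] = msg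
--             unique.append(msg)
--
--     return list(seen.values())
-- ===== SOURCE B (Python) =====
-- def dedupe_messages(messages):
--     """Remove duplicate messages (same text from multiple relays)"""
--     groups = {}
--     for msg in messages:
--         groups.setdefault(msg["text"].lower().strip()[:50], []).append(msg)
--     return [next((m for m in group if m["distance"] != "?"), group[0])
--             for group in groups.values()]
-- ===== Notes on version B (the rewrite author's own statement) =====
-- stated objective: alternative
-- what changed: A's single fused loop that stores one winner per normalized text and upgrades it in place is replaced by two differently-shaped passes: first group all messages into an ordered dict of lists keyed by the normalized text, then select from each group the first message with a known distance (else the group's first message).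
-- outside the precondition, e.g. on dedupe_messages([{'text': 'a'}]): A returns [{'text': 'a'}], B raises KeyError
import Mathlib
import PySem

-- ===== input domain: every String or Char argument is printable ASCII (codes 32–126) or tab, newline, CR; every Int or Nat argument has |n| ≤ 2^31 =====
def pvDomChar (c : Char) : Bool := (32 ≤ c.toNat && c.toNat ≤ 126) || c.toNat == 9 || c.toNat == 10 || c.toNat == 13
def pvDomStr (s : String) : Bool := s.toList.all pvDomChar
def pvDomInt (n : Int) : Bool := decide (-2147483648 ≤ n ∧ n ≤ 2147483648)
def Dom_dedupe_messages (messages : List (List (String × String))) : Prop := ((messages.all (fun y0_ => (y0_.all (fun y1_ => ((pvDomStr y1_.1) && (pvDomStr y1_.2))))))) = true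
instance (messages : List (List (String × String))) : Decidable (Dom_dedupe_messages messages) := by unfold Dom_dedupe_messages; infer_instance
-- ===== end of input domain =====

-- B replaces A's fused dedupe-with-upgrade loop by two passes (group by normalized text, then pick
-- first known-distance message per group); 'alternative' objective, same cost, return value only.

-- ===== PORT A =====
-- msg["k"]: dict lookup, first match in the association list (KeyError inputs are outside Pre_).
def pvAget (m : List (String × String)) (k : String) : String :=
  (PySem.Dict.mk m).getD k ""

-- msg["text"].lower().strip()[:50]
def pvAnorm (msg : List (String × String)) : String :=
  PySem.Str.slice (PySem.Str.strip (PySem.Str.lower (pvAget msg "text"))) none (some 50)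

def pvAstep (st : PySem.Dict String (List (String × String)) × List (List (String × String)))
    (msg : List (String × String)) :
    PySem.Dict String (List (String × String)) × List (List (String × String)) :=
  let text_norm := pvAnorm msg
  if st.1.contains text_norm then
    if pvAget msg "distance" ≠ "?" ∧ pvAget (st.1.getD text_norm []) "distance" = "?" then
      (st.1.insert text_norm msg, st.2)
    else st
  else
    (st.1.insert text_norm msg, st.2 ++ [msg])

def dedupe_messages (messages : List (List (String × String))) : List (List (String × String)) :=
  (messages.foldl pvAstep (PySem.Dict.empty, [])).1.values

-- ===== PORT B =====
def pvBget (m : List (String × String)) (k : String) : String :=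
  (PySem.Dict.mk m).getD k ""

def pvBnorm (msg : List (String × String)) : String :=
  PySem.Str.slice (PySem.Str.strip (PySem.Str.lower (pvBget msg "text"))) none (some 50)

-- next((m for m in group if m["distance"] != "?"), group[0])
def pvBselect (group : List (List (String × String))) : List (String × String) :=
  match group.find? (fun m => pvBget m "distance" != "?") with
  | some m => m
  | none => group.headD []

def dedupe_messages_alt (messages : List (List (String × String))) : List (List (String × String)) :=
  let groups := messages.foldl
    (fun d msg => d.modify (pvBnorm msg) [] (fun g => g ++ [msg])) PySem.Dict.empty
  groups.values.map pvBselect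

-- ===== PRECONDITION & SPEC =====
-- Pre_ excludes messages missing the "text" or "distance" key: on those at least one of the two
-- Python programs raises KeyError (which one depends on the message's position in its group).
def Pre_dedupe_messages (messages : List (List (String × String))) : Prop :=
  (messages.all (fun m => (PySem.Dict.mk m).contains "text" && (PySem.Dict.mk m).contains "distance")) = true
instance (messages : List (List (String × String))) : Decidable (Pre_dedupe_messages messages) := by
  unfold Pre_dedupe_messages; infer_instance

def pvWitness_dedupe_messages : (List (List (String × String))) :=
  [[("text", "Hi"), ("distance", "?")], [("text", "hi "), ("distance", "2km")]]

def Spec_dedupe_messages (messages : List (List (String × String))) (out : List (List (String × String))) : Prop := out = dedupe_messages_alt messages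
instance (messages : List (List (String × String))) (out : List (List (String × String))) : Decidable (Spec_dedupe_messages messages out) := by unfold Spec_dedupe_messages; infer_instance

-- ===== CLAIM (what is proved, stated in full; the proofs are below) =====
def Claim_equal_dedupe_messages : Prop := ∀ (messages : List (List (String × String))), Dom_dedupe_messages messages → Pre_dedupe_messages messages → Spec_dedupe_messages messages (dedupe_messages messages)

-- ===== LEMMAS AND PROOFS =====

theorem pvBget_eq_pvAget : pvBget = pvAget := rfl
theorem pvBnorm_eq_pvAnorm : pvBnorm = pvAnorm := rfl

-- How B's per-group selection evolves when one more message joins the group.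
theorem pvBselect_append (g : List (List (String × String))) (m : List (String × String))
    (hg : g ≠ []) :
    pvBselect (g ++ [m]) =
      if pvAget m "distance" ≠ "?" ∧ pvAget (pvBselect g) "distance" = "?" then m
      else pvBselect g := by
  match g, hg with
  | a :: t, _ =>
    unfold pvBselect
    rw [List.find?_append]
    cases hf : (a :: t).find? (fun m => pvBget m "distance" != "?") with
    | some s =>
        have hs := List.find?_some hf
        simp only [bne_iff_ne, ne_eq] at hs
        simp [Option.or, pvBget_eq_pvAget ▸ hs]
    | none =>
        have ha : pvAget a "distance" = "?" := by
          have := List.find?_eq_none.mp hf a (by simp)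
          simpa [pvBget_eq_pvAget, bne_iff_ne] using this
        by_cases hm : pvAget m "distance" = "?"
        · have hb : (pvBget m "distance" != "?") = false := by
            simp [pvBget_eq_pvAget, hm]
          simp [Option.or, List.find?, hb, hm]
        · have hb : (pvBget m "distance" != "?") = true := by
            simp [pvBget_eq_pvAget, bne_iff_ne, hm]
          simp [Option.or, List.find?, hb, hm, ha]

-- Invariant linking A's winner dict to B's group dict over the same prefix of messages.
theorem pv_main (l : List (List (String × String)))
    (seen : PySem.Dict String (List (String × String)))
    (groups : PySem.Dict String (List (List (String × String))))
    (unique : List (List (String × String)))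
    (hk : seen.keys = groups.keys)
    (hnd : groups.keys.Nodup)
    (hval : ∀ k ∈ groups.keys, groups.getD k [] ≠ [] ∧ seen.getD k [] = pvBselect (groups.getD k [])) :
    (l.foldl pvAstep (seen, unique)).1.keys =
      (l.foldl (fun d msg => d.modify (pvBnorm msg) [] (fun g => g ++ [msg])) groups).keys ∧
    (l.foldl (fun d msg => d.modify (pvBnorm msg) [] (fun g => g ++ [msg])) groups).keys.Nodup ∧
    ∀ k ∈ (l.foldl (fun d msg => d.modify (pvBnorm msg) [] (fun g => g ++ [msg])) groups).keys,
      (l.foldl (fun d msg => d.modify (pvBnorm msg) [] (fun g => g ++ [msg])) groups).getD k [] ≠ [] ∧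
      (l.foldl pvAstep (seen, unique)).1.getD k [] =
        pvBselect ((l.foldl (fun d msg => d.modify (pvBnorm msg) [] (fun g => g ++ [msg])) groups).getD k []) := by
  induction l generalizing seen groups unique with
  | nil => exact ⟨hk, hnd, hval⟩
  | cons msg rest ih =>
      simp only [List.foldl_cons]
      have hbn : pvBnorm msg = pvAnorm msg := by rw [pvBnorm_eq_pvAnorm]
      have hcont : seen.contains (pvAnorm msg) = groups.contains (pvAnorm msg) := by
        rw [Bool.eq_iff_iff, PySem.Dict.contains_iff_mem_keys, PySem.Dict.contains_iff_mem_keys, hk]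
      have hkeysg : (groups.modify (pvBnorm msg) [] (fun g => g ++ [msg])).keys =
          if groups.contains (pvAnorm msg) then groups.keys else groups.keys ++ [pvAnorm msg] := by
        rw [hbn, PySem.Dict.keys_modify]
        by_cases h : groups.contains (pvAnorm msg) = true
        · rw [PySem.Dict.keys_insert_of_contains _ _ h, if_pos h]
        · rw [PySem.Dict.keys_insert_of_not_contains _ _ (by simpa using h), if_neg h]
      by_cases h : groups.contains (pvAnorm msg) = true
      · -- duplicate key: the group grows; A possibly upgrades its stored winner
        have h1 : seen.contains (pvAnorm msg) = true := hcont ▸ h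
        have hmem : (pvAnorm msg) ∈ groups.keys := (PySem.Dict.contains_iff_mem_keys _ _).mp h
        obtain ⟨hgne, hsel⟩ := hval _ hmem
        have hA : pvAstep (seen, unique) msg =
            ((if pvAget msg "distance" ≠ "?" ∧ pvAget (seen.getD (pvAnorm msg) []) "distance" = "?"
              then seen.insert (pvAnorm msg) msg else seen), unique) := by
          simp only [pvAstep, h1, if_true]
          split_ifs <;> rfl
        rw [hA]
        have hkA : (if pvAget msg "distance" ≠ "?" ∧ pvAget (seen.getD (pvAnorm msg) []) "distance" = "?"
              then seen.insert (pvAnorm msg) msg else seen).keys = groups.keys := by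
          split_ifs
          · rw [PySem.Dict.keys_insert_of_contains _ _ h1, hk]
          · exact hk
        refine ih _ _ _ (by rw [hkA, hkeysg, if_pos h]) (by rw [hkeysg, if_pos h]; exact hnd) ?_
        rw [hkeysg, if_pos h]
        intro k hkmem
        by_cases hke : k = pvAnorm msg
        · subst hke
          constructor
          · rw [hbn, PySem.Dict.getD_modify_self]; simp
          · rw [hbn, PySem.Dict.getD_modify_self, pvBselect_append _ _ hgne, ← hsel]
            split_ifs with hc
            · exact PySem.Dict.getD_insert_self _ _ _ _
            · rfl
        · obtain ⟨hg1, hg2⟩ := hval k hkmem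
          refine ⟨by rw [hbn, PySem.Dict.getD_modify_of_ne _ _ _ hke]; exact hg1, ?_⟩
          rw [hbn, PySem.Dict.getD_modify_of_ne _ _ _ hke]
          split_ifs
          · rw [PySem.Dict.getD_insert_of_ne _ _ _ hke]; exact hg2
          · exact hg2
      · -- fresh key: both sides create the entry
        have h' : groups.contains (pvAnorm msg) = false := by simpa using h
        have h1' : seen.contains (pvAnorm msg) = false := hcont ▸ h'
        have hA : pvAstep (seen, unique) msg = (seen.insert (pvAnorm msg) msg, unique ++ [msg]) := by
          simp only [pvAstep, h1', Bool.false_eq_true, if_false]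
        rw [hA]
        have hnewg : (groups.modify (pvBnorm msg) [] (fun g => g ++ [msg])).getD (pvAnorm msg) [] = [msg] := by
          rw [hbn, PySem.Dict.getD_modify_self, PySem.Dict.getD_of_not_contains _ _ h']
          exact List.nil_append _
        refine ih _ _ _ ?_ ?_ ?_
        · rw [PySem.Dict.keys_insert_of_not_contains _ _ h1', hkeysg, if_neg h, hk]
        · rw [hkeysg, if_neg h]
          refine List.nodup_append.mpr ⟨hnd, List.nodup_singleton _, ?_⟩
          intro a ha b hb
          rw [List.mem_singleton] at hb
          subst hb
          intro heq
          subst heq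
          exact absurd ((PySem.Dict.contains_iff_mem_keys _ _).mpr ha) (by simp [h'])
        · rw [hkeysg, if_neg h]
          intro k hkmem
          by_cases hke : k = pvAnorm msg
          · subst hke
            rw [hnewg, PySem.Dict.getD_insert_self]
            refine ⟨by simp, ?_⟩
            by_cases hd : pvAget msg "distance" = "?"
            · have hb : (pvBget msg "distance" != "?") = false := by
                simp [pvBget_eq_pvAget, hd]
              simp [pvBselect, List.find?, hb]
            · have hb : (pvBget msg "distance" != "?") = true := by
                simp [pvBget_eq_pvAget, bne_iff_ne, hd]
              simp [pvBselect, List.find?, hb]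
          · have hkmem' : k ∈ groups.keys := by
              rcases List.mem_append.mp hkmem with hq | hq
              · exact hq
              · rw [List.mem_singleton] at hq; exact absurd hq hke
            obtain ⟨hg1, hg2⟩ := hval k hkmem'
            rw [hbn, PySem.Dict.getD_modify_of_ne _ _ _ hke,
                PySem.Dict.getD_insert_of_ne _ _ _ hke]
            exact ⟨hg1, hg2⟩

-- ===== VERDICT (by name: the statement is the Claim_ definition above) =====
theorem dedupe_messages_spec : Claim_equal_dedupe_messages := by
  intro messages _ _
  unfold Spec_dedupe_messages
  obtain ⟨hk, hnd, hval⟩ := pv_main messages PySem.Dict.empty PySem.Dict.empty []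
    (by simp) (by simp) (by simp)
  show (messages.foldl pvAstep (PySem.Dict.empty, [])).1.values =
    List.map pvBselect (messages.foldl
      (fun d msg => d.modify (pvBnorm msg) [] (fun g => g ++ [msg])) PySem.Dict.empty).values
  rw [PySem.Dict.values_eq_map_keys _ (hk ▸ hnd) ([] : List (String × String)),
      PySem.Dict.values_eq_map_keys _ hnd ([] : List (List (String × String))), hk, List.map_map]
  refine List.map_congr_left ?_
  intro k hkm
  exact (hval k hkm).2
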